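-- pv_equiv track=rewrite | github.com/odanebillit12-png/rl-training-colab | ai_game_agent/drawing/pixel_art_researcher.py | _static_tips
-- ===== SOURCE A (Python) =====
-- def _static_tips(name: str, task: dict) -> str:
--     w = task.get("width", 48)
--     h = task.get("height", 48)
--     name_lower = name.lower()
--
--     tips = [f"Canvas {w}x{h}px"]
--
--     if "character" in name_lower or any(k in name_lower for k in
--             ["warrior", "mage", "rogue", "healer", "hero", "goblin", "skeleton"]):
--         tips.append("Strong silhouette first — must be readable at 1x size")
--         tips.append("Light source from top-left, shadow bottom-right")
--         tips.append("3-4 colors per region max, 1px outline")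
--
--     elif "tile" in name_lower or "ground" in name_lower or "floor" in name_lower:
--         tips.append("Seamless edges — top=bottom, left=right pixels must match")
--         tips.append("Subtle noise texture, avoid large flat areas")
--
--     elif "chest" in name_lower or "prop" in name_lower or "object" in name_lower:
--         tips.append("Isometric-friendly shape, clear material read")
--         tips.append("Rim light on top-left edge for 2.75D pop")
--
--     elif "dragon" in name_lower or "boss" in name_lower:
--         tips.append("Imposing silhouette — massive, fills canvas")
--         tips.append("Scale texture with iridescence, glowing eyes as focal point")
--
--     elif "slime" in name_lower:
--         tips.append("Round jelly body, inner glow, highlight dot at top")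
--
--     return " | ".join(tips)
-- ===== SOURCE B (Python) =====
-- # Single pass over a flat keyword->rank table, keeping a running minimum-rank
-- # ("best so far") accumulator; the result is head + the best rank's pre-joined
-- # tip suffix (no tips list, no join, no precedence cascade).
--
-- S0 = (" | Strong silhouette first — must be readable at 1x size"
--       " | Light source from top-left, shadow bottom-right"
--       " | 3-4 colors per region max, 1px outline")
-- S1 = (" | Seamless edges — top=bottom, left=right pixels must match"
--       " | Subtle noise texture, avoid large flat areas")
-- S2 = (" | Isometric-friendly shape, clear material read"
--       " | Rim light on top-left edge for 2.75D pop")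
-- S3 = (" | Imposing silhouette — massive, fills canvas"
--       " | Scale texture with iridescence, glowing eyes as focal point")
-- S4 = " | Round jelly body, inner glow, highlight dot at top"
--
-- ENTRIES = [
--     ("character", 0, S0), ("warrior", 0, S0), ("mage", 0, S0), ("rogue", 0, S0),
--     ("healer", 0, S0), ("hero", 0, S0), ("goblin", 0, S0), ("skeleton", 0, S0),
--     ("tile", 1, S1), ("ground", 1, S1), ("floor", 1, S1),
--     ("chest", 2, S2), ("prop", 2, S2), ("object", 2, S2),
--     ("dragon", 3, S3), ("boss", 3, S3),
--     ("slime", 4, S4),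
-- ]
--
--
-- def _static_tips(name: str, task: dict) -> str:
--     w = task.get("width", 48)
--     h = task.get("height", 48)
--     nl = name.lower()
--     head = f"Canvas {w}x{h}px"
--     best = None
--     for kw, rank, suffix in ENTRIES:
--         if kw in nl and (best is None or rank < best[0]):
--             best = (rank, suffix)
--     return head if best is None else head + best[1]
-- ===== Notes on version B (the rewrite author's own statement) =====
-- stated objective: alternative
-- what changed: Replaced the if/elif precedence cascade and tips-list join by a single unconditional pass over a flat keyword-to-rank table that keeps a running minimum-rank accumulator (argmin), the result being the Canvas head concatenated with the best rank's pre-joined tip suffix.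
import Mathlib
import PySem

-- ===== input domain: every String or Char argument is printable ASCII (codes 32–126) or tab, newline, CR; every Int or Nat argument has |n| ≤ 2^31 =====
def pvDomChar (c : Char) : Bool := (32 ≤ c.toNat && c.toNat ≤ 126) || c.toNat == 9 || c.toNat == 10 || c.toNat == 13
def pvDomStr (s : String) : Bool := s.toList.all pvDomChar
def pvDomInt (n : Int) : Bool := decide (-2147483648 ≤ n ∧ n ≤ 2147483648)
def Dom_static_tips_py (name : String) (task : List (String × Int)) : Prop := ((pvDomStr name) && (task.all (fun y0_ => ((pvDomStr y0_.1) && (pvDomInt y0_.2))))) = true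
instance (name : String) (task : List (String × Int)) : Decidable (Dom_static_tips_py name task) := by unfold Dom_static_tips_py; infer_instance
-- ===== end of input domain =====

-- B replaces A's if/elif precedence cascade by ONE unconditional pass over a flat
-- keyword→rank table keeping a running minimum-rank accumulator, and builds the result
-- by string concatenation of a pre-joined suffix (objective: alternative; no speed claim).

-- ===== PORT A =====
-- literal transliteration of A's if/elif chain
def static_tips_py (name : String) (task : List (String × Int)) : String :=
  let w := (PySem.Dict.mk task).getD "width" 48
  let h := (PySem.Dict.mk task).getD "height" 48
  let name_lower := PySem.Str.lower name
  let tips := ["Canvas " ++ PySem.Int.toStr w ++ "x" ++ PySem.Int.toStr h ++ "px"]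
  let tips :=
    if PySem.Str.isIn "character" name_lower ||
        (["warrior", "mage", "rogue", "healer", "hero", "goblin", "skeleton"].any
          (fun k => PySem.Str.isIn k name_lower)) then
      tips ++ ["Strong silhouette first — must be readable at 1x size"]
           ++ ["Light source from top-left, shadow bottom-right"]
           ++ ["3-4 colors per region max, 1px outline"]
    else if PySem.Str.isIn "tile" name_lower || PySem.Str.isIn "ground" name_lower ||
        PySem.Str.isIn "floor" name_lower then
      tips ++ ["Seamless edges — top=bottom, left=right pixels must match"]
           ++ ["Subtle noise texture, avoid large flat areas"]
    else if PySem.Str.isIn "chest" name_lower || PySem.Str.isIn "prop" name_lower ||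
        PySem.Str.isIn "object" name_lower then
      tips ++ ["Isometric-friendly shape, clear material read"]
           ++ ["Rim light on top-left edge for 2.75D pop"]
    else if PySem.Str.isIn "dragon" name_lower || PySem.Str.isIn "boss" name_lower then
      tips ++ ["Imposing silhouette — massive, fills canvas"]
           ++ ["Scale texture with iridescence, glowing eyes as focal point"]
    else if PySem.Str.isIn "slime" name_lower then
      tips ++ ["Round jelly body, inner glow, highlight dot at top"]
    else tips
  PySem.Str.join " | " tips

-- ===== PORT B =====
-- Source B's pre-joined suffix strings S0..S4
def pvS0 : String := " | Strong silhouette first — must be readable at 1x size | Light source from top-left, shadow bottom-right | 3-4 colors per region max, 1px outline"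
def pvS1 : String := " | Seamless edges — top=bottom, left=right pixels must match | Subtle noise texture, avoid large flat areas"
def pvS2 : String := " | Isometric-friendly shape, clear material read | Rim light on top-left edge for 2.75D pop"
def pvS3 : String := " | Imposing silhouette — massive, fills canvas | Scale texture with iridescence, glowing eyes as focal point"
def pvS4 : String := " | Round jelly body, inner glow, highlight dot at top"

-- Source B's flat ENTRIES table (keyword, rank, suffix)
def pvEntries : List (String × Int × String) :=
  [("character", 0, pvS0), ("warrior", 0, pvS0), ("mage", 0, pvS0), ("rogue", 0, pvS0),
   ("healer", 0, pvS0), ("hero", 0, pvS0), ("goblin", 0, pvS0), ("skeleton", 0, pvS0),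
   ("tile", 1, pvS1), ("ground", 1, pvS1), ("floor", 1, pvS1),
   ("chest", 2, pvS2), ("prop", 2, pvS2), ("object", 2, pvS2),
   ("dragon", 3, pvS3), ("boss", 3, pvS3),
   ("slime", 4, pvS4)]

-- the loop body: keep the smaller-rank hit ('best is None or rank < best[0]')
def pvStep (nl : String) (best : Option (Int × String)) (e : String × Int × String) :
    Option (Int × String) :=
  if PySem.Str.isIn e.1 nl &&
      (match best with | none => true | some b => decide (e.2.1 < b.1)) then
    some e.2
  else best

def static_tips_py_alt (name : String) (task : List (String × Int)) : String :=
  let w := (PySem.Dict.mk task).getD "width" 48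
  let h := (PySem.Dict.mk task).getD "height" 48
  let nl := PySem.Str.lower name
  let head := "Canvas " ++ PySem.Int.toStr w ++ "x" ++ PySem.Int.toStr h ++ "px"
  match pvEntries.foldl (pvStep nl) none with
  | none => head
  | some b => head ++ b.2

-- ===== PRECONDITION & SPEC =====
def Spec_static_tips_py (name : String) (task : List (String × Int)) (out : String) : Prop := out = static_tips_py_alt name task
instance (name : String) (task : List (String × Int)) (out : String) : Decidable (Spec_static_tips_py name task out) := by unfold Spec_static_tips_py; infer_instance

-- ===== CLAIM (what is proved, stated in full; the proofs are below) =====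
def Claim_equal_static_tips_py : Prop := ∀ (name : String) (task : List (String × Int)), Dom_static_tips_py name task → Spec_static_tips_py name task (static_tips_py name task)

-- ===== LEMMAS AND PROOFS =====

-- once the accumulator holds a rank no later entry beats, the fold keeps it
theorem pvStep_stable (nl : String) (b : Int × String) :
    ∀ (es : List (String × Int × String)), (∀ e ∈ es, ¬ e.2.1 < b.1) →
    es.foldl (pvStep nl) (some b) = some b := by
  intro es
  induction es with
  | nil => intro _; rfl
  | cons e es ih =>
    intro h
    have he : ¬ e.2.1 < b.1 := h e (List.mem_cons_self ..)
    have : pvStep nl (some b) e = some b := by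
      simp [pvStep, he]
    rw [List.foldl_cons, this]
    exact ih fun x hx => h x (List.mem_cons_of_mem _ hx)


-- fold of one constant-rank keyword group starting from an empty accumulator
theorem pvFold_group_none (nl : String) (r : Int) (s : String) :
    ∀ (kws : List String), (kws.map (fun k => (k, r, s))).foldl (pvStep nl) none =
      if kws.any (fun k => PySem.Str.isIn k nl) then some (r, s) else none := by
  intro kws
  induction kws with
  | nil => rfl
  | cons k kws ih =>
    by_cases hk : PySem.Str.isIn k nl = true
    · simp only [List.map_cons, List.foldl_cons, List.any_cons, hk, Bool.true_or, if_true]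
      have hstep : pvStep nl none (k, r, s) = some (r, s) := by
        unfold pvStep; rw [hk]; rfl
      rw [hstep]
      exact pvStep_stable nl (r, s) _ (by
        intro e he
        obtain ⟨k', _, rfl⟩ := List.mem_map.mp he
        simp)
    · have hk' : PySem.Str.isIn k nl = false := Bool.eq_false_iff.mpr hk
      have hstep : pvStep nl none (k, r, s) = none := by
        unfold pvStep; rw [hk']; rfl
      simp only [List.map_cons, List.foldl_cons, hstep, List.any_cons, hk', Bool.false_or, ih]

-- join of the one-line tips list and of each matched tips list, as plain concatenation
theorem pvJoin1 (hd : String) : PySem.Str.join " | " [hd] = hd := by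
  apply String.toList_injective
  simp [PySem.Str.toList_join, PySem.Chars.join_singleton]

theorem pvJoin2 (hd a : String) : PySem.Str.join " | " [hd, a] = hd ++ (" | " ++ a) := by
  apply String.toList_injective
  simp [PySem.Str.toList_join, PySem.Chars.join_cons_cons, PySem.Chars.join_singleton]

theorem pvJoin3 (hd a b : String) :
    PySem.Str.join " | " [hd, a, b] = hd ++ (" | " ++ a ++ " | " ++ b) := by
  apply String.toList_injective
  simp [PySem.Str.toList_join, PySem.Chars.join_cons_cons, PySem.Chars.join_singleton]

theorem pvJoin4 (hd a b c : String) :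
    PySem.Str.join " | " [hd, a, b, c] = hd ++ (" | " ++ a ++ " | " ++ b ++ " | " ++ c) := by
  apply String.toList_injective
  simp [PySem.Str.toList_join, PySem.Chars.join_cons_cons, PySem.Chars.join_singleton]

-- B's fold over the whole flat table, characterised by the five group conditions
theorem pvFold_entries (nl : String) :
    pvEntries.foldl (pvStep nl) none =
      if ["character", "warrior", "mage", "rogue", "healer", "hero", "goblin",
          "skeleton"].any (fun k => PySem.Str.isIn k nl) then some (0, pvS0)
      else if ["tile", "ground", "floor"].any (fun k => PySem.Str.isIn k nl) then
        some (1, pvS1)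
      else if ["chest", "prop", "object"].any (fun k => PySem.Str.isIn k nl) then
        some (2, pvS2)
      else if ["dragon", "boss"].any (fun k => PySem.Str.isIn k nl) then some (3, pvS3)
      else if PySem.Str.isIn "slime" nl then some (4, pvS4)
      else none := by
  have hb : ∀ (r : Int) (s : String) (r' : Int) (s' : String) (kws : List String),
      r < r' → (kws.map (fun k => (k, r', s'))).foldl (pvStep nl) (some (r, s)) = some (r, s) := by
    intro r s r' s' kws hlt
    exact pvStep_stable nl (r, s) _ (by
      intro e he
      obtain ⟨k', _, rfl⟩ := List.mem_map.mp he
      simp only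
      omega)
  have hsplit : pvEntries =
      (["character", "warrior", "mage", "rogue", "healer", "hero", "goblin",
        "skeleton"].map (fun k => (k, (0 : Int), pvS0)))
      ++ ((["tile", "ground", "floor"].map (fun k => (k, (1 : Int), pvS1)))
      ++ ((["chest", "prop", "object"].map (fun k => (k, (2 : Int), pvS2)))
      ++ ((["dragon", "boss"].map (fun k => (k, (3 : Int), pvS3)))
      ++ (["slime"].map (fun k => (k, (4 : Int), pvS4)))))) := rfl
  rw [hsplit, List.foldl_append, List.foldl_append, List.foldl_append, List.foldl_append,
    pvFold_group_none]
  by_cases h0 : (["character", "warrior", "mage", "rogue", "healer", "hero", "goblin",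
      "skeleton"].any (fun k => PySem.Str.isIn k nl)) = true
  · rw [if_pos h0, if_pos h0, hb 0 pvS0 1 pvS1 _ (by norm_num),
      hb 0 pvS0 2 pvS2 _ (by norm_num), hb 0 pvS0 3 pvS3 _ (by norm_num),
      hb 0 pvS0 4 pvS4 _ (by norm_num)]
  · rw [if_neg h0, if_neg h0, pvFold_group_none]
    by_cases h1 : (["tile", "ground", "floor"].any (fun k => PySem.Str.isIn k nl)) = true
    · rw [if_pos h1, if_pos h1, hb 1 pvS1 2 pvS2 _ (by norm_num),
        hb 1 pvS1 3 pvS3 _ (by norm_num), hb 1 pvS1 4 pvS4 _ (by norm_num)]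
    · rw [if_neg h1, if_neg h1, pvFold_group_none]
      by_cases h2 : (["chest", "prop", "object"].any (fun k => PySem.Str.isIn k nl)) = true
      · rw [if_pos h2, if_pos h2, hb 2 pvS2 3 pvS3 _ (by norm_num),
          hb 2 pvS2 4 pvS4 _ (by norm_num)]
      · rw [if_neg h2, if_neg h2, pvFold_group_none]
        by_cases h3 : (["dragon", "boss"].any (fun k => PySem.Str.isIn k nl)) = true
        · rw [if_pos h3, if_pos h3, hb 3 pvS3 4 pvS4 _ (by norm_num)]
        · rw [if_neg h3, if_neg h3, pvFold_group_none]
          simp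

-- ===== VERDICT (by name: the statement is the Claim_ definition above) =====
theorem static_tips_py_spec : Claim_equal_static_tips_py := by
  intro name task _
  unfold Spec_static_tips_py static_tips_py static_tips_py_alt
  simp only [pvFold_entries, List.any_cons, List.any_nil, Bool.or_false, Bool.or_assoc,
    List.cons_append, List.nil_append]
  split_ifs <;>
    simp only [pvJoin1, pvJoin2, pvJoin3, pvJoin4] <;>
    (apply String.toList_injective; simp [pvS0, pvS1, pvS2, pvS3, pvS4])
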